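-- pv_equiv track=rewrite | github.com/daniel-reich/ubiquitous-fiesta | Y4gwcGfcGb3SKz6Tu_4.py | max_separator
-- ===== SOURCE A (Python) =====
-- def max_separator(txt):
--     lst = []
--     for i, x in enumerate(txt):
--         idx = txt[i+1:].find(x)
--         if idx >= 0:
--             lst.append((idx,x))
--     if not lst:
--         return lst
--     x, y = max(lst)
--     return sorted([b for a,b in lst if a == x])
-- ===== SOURCE B (Python) =====
-- def max_separator(txt):
--     # one right-to-left pass: next-occurrence index per char kept in a dict
--     nxt = {}
--     gaps = []
--     for i in range(len(txt) - 1, -1, -1):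
--         c = txt[i]
--         if c in nxt:
--             gaps.append((nxt[c] - i - 1, c))
--         nxt[c] = i
--     if not gaps:
--         return []
--     best = max(g for g, _ in gaps)
--     return sorted(c for g, c in gaps if g == best)
-- ===== Notes on version B (the rewrite author's own statement) =====
-- stated objective: faster
-- what changed: Replaced the quadratic per-position substring search (txt[i+1:].find(x) for every index) by a single right-to-left pass that keeps the next occurrence of each character in a dict, collecting the gap pairs directly, then one max and one sort.
import Mathlib
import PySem

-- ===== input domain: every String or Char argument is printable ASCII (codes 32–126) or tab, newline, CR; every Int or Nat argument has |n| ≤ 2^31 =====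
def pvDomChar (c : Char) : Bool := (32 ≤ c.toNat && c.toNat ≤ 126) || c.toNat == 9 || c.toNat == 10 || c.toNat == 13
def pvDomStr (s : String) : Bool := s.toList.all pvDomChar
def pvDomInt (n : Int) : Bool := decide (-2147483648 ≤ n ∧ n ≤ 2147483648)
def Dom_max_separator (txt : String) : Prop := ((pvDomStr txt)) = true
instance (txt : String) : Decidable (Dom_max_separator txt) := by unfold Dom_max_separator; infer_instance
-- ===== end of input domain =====

-- B replaces A's quadratic per-position substring search by one right-to-left pass
-- that keeps the next occurrence of each character in a dict (objective: faster).

-- ===== PORT A =====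
-- A's loop body: for each position, idx = txt[i+1:].find(x) — the slice txt[i+1:] is
-- exactly the remaining characters `rest`, and .find is PySem.Chars.find with the
-- one-character needle [x].
def aScan : List Char → List (Int × String)
  | [] => []
  | x :: rest =>
    (if PySem.Chars.find rest [x] ≥ 0 then
        [(PySem.Chars.find rest [x], String.mk [x])] else []) ++ aScan rest

-- Python max(lst) on (int, str) pairs: lexicographic, keeps the first maximum.
def pyMaxPair (m : Int × String) : List (Int × String) → Int × String
  | [] => m
  | p :: rest => pyMaxPair (if m.1 < p.1 ∨ (m.1 = p.1 ∧ m.2 < p.2) then p else m) rest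

def max_separator (txt : String) : List String :=
  match aScan txt.toList with
  | [] => []
  | p :: rest =>
      PySem.List.sorted
        (((p :: rest).filter (fun q => q.1 == (pyMaxPair p rest).1)).map (·.2))
        (fun s => s) false

-- ===== PORT B =====
-- for i in range(len(txt)-1, -1, -1): c = txt[i] — the reversed enumeration of txt.
def enumChars (i : Int) : List Char → List (Int × Char)
  | [] => []
  | x :: xs => (i, x) :: enumChars (i + 1) xs

def bScan : List (Int × Char) → PySem.Dict Char Int → List (Int × String)
  | [], _ => []
  | (i, c) :: rest, nxt =>
      (match PySem.Dict.get? nxt c with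
       | some j => [(j - i - 1, String.mk [c])]
       | none => []) ++ bScan rest (PySem.Dict.insert nxt c i)

-- Python max over a nonempty int sequence.
def intMax (m : Int) : List Int → Int
  | [] => m
  | x :: rest => intMax (if m < x then x else m) rest

def max_separator_alt (txt : String) : List String :=
  match bScan (enumChars 0 txt.toList).reverse PySem.Dict.empty with
  | [] => []
  | g :: t =>
      PySem.List.sorted
        (((g :: t).filter (fun q => q.1 == intMax g.1 (t.map (·.1)))).map (·.2))
        (fun s => s) false

-- ===== PRECONDITION & SPEC =====
def Spec_max_separator (txt : String) (out : List String) : Prop := out = max_separator_alt txt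
instance (txt : String) (out : List String) : Decidable (Spec_max_separator txt out) := by unfold Spec_max_separator; infer_instance

-- ===== CLAIM (what is proved, stated in full; the proofs are below) =====
def Claim_equal_max_separator : Prop := ∀ (txt : String), Dom_max_separator txt → Spec_max_separator txt (max_separator txt)

-- ===== LEMMAS AND PROOFS =====

theorem find_nil_single (c : Char) : PySem.Chars.find [] [c] = -1 := by
  simp [PySem.Chars.find, PySem.Chars.find.go, List.isEmpty]

theorem find_go_single (c : Char) : ∀ (l : List Char) (k : Nat),
    PySem.Chars.find.go [c] l k =
      if PySem.Chars.find l [c] ≥ 0 then PySem.Chars.find l [c] + k else -1 := by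
  intro l
  induction l with
  | nil => intro k; simp [PySem.Chars.find, PySem.Chars.find.go, List.isEmpty]
  | cons y ys ih =>
    intro k
    by_cases h : c = y
    · subst h
      simp [PySem.Chars.find, PySem.Chars.find.go, List.isPrefixOf]
    · have hpre : [c].isPrefixOf (y :: ys) = false := by
        simp [List.isPrefixOf, h]
      rw [show PySem.Chars.find.go [c] (y :: ys) k
            = PySem.Chars.find.go [c] ys (k + 1) by
            simp [PySem.Chars.find.go, hpre]]
      rw [show PySem.Chars.find (y :: ys) [c] = PySem.Chars.find.go [c] ys 1 by
            simp [PySem.Chars.find, PySem.Chars.find.go, hpre]]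
      rw [ih (k + 1), ih 1]
      split_ifs with h1 h2 h3 <;> push_cast at * <;> omega

theorem find_cons_single (c y : Char) (ys : List Char) :
    PySem.Chars.find (y :: ys) [c] =
      if c = y then 0
      else if PySem.Chars.find ys [c] ≥ 0 then PySem.Chars.find ys [c] + 1 else -1 := by
  by_cases h : c = y
  · subst h; simp [PySem.Chars.find, PySem.Chars.find.go, List.isPrefixOf]
  · have hpre : [c].isPrefixOf (y :: ys) = false := by simp [List.isPrefixOf, h]
    rw [show PySem.Chars.find (y :: ys) [c] = PySem.Chars.find.go [c] ys 1 by
          simp [PySem.Chars.find, PySem.Chars.find.go, hpre]]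
    rw [find_go_single, if_neg h]
    by_cases hf : PySem.Chars.find ys [c] ≥ 0
    · rw [if_pos hf, if_pos hf]; norm_num
    · rw [if_neg hf, if_neg hf]

-- A's scan, with the characters to the right of the scanned prefix made explicit.
def aScanIn : List Char → List Char → List (Int × String)
  | [], _ => []
  | x :: xs, suf =>
    (if PySem.Chars.find (xs ++ suf) [x] ≥ 0 then
        [(PySem.Chars.find (xs ++ suf) [x], String.mk [x])] else []) ++ aScanIn xs suf

theorem aScanIn_nil (cs : List Char) : aScanIn cs [] = aScan cs := by
  induction cs with
  | nil => rfl
  | cons x xs ih => simp [aScanIn, aScan, ih]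

theorem aScanIn_snoc (y : Char) : ∀ (pre suf : List Char),
    aScanIn (pre ++ [y]) suf =
      aScanIn pre (y :: suf) ++
        (if PySem.Chars.find suf [y] ≥ 0 then
            [(PySem.Chars.find suf [y], String.mk [y])] else []) := by
  intro pre
  induction pre with
  | nil => intro suf; simp [aScanIn]
  | cons x xs ih =>
    intro suf
    simp only [List.cons_append, aScanIn, ih suf, List.append_assoc]
    simp

theorem enumChars_snoc (y : Char) : ∀ (l : List Char) (i : Int),
    enumChars i (l ++ [y]) = enumChars i l ++ [(i + l.length, y)] := by
  intro l
  induction l with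
  | nil => intro i; simp [enumChars]
  | cons x xs ih =>
    intro i
    simp only [List.cons_append, enumChars, ih, List.length_cons]
    have h : i + 1 + (xs.length : Int) = i + ((xs.length + 1 : Nat) : Int) := by push_cast; ring
    rw [h]

theorem bScan_eq : ∀ (pre suf : List Char) (nxt : PySem.Dict Char Int),
    (∀ c, PySem.Dict.get? nxt c =
        if PySem.Chars.find suf [c] ≥ 0 then
          some ((pre.length : Int) + PySem.Chars.find suf [c]) else none) →
    bScan (enumChars 0 pre).reverse nxt = (aScanIn pre suf).reverse := by
  intro pre
  induction pre using List.reverseRecOn with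
  | nil => intro suf nxt _; simp [enumChars, bScan, aScanIn]
  | append_singleton ps y ih =>
    intro suf nxt hnxt
    rw [enumChars_snoc, List.reverse_append]
    simp only [List.reverse_cons, List.reverse_nil, List.nil_append, List.singleton_append]
    rw [show bScan ((0 + (ps.length : Int), y) :: (enumChars 0 ps).reverse) nxt
          = (match PySem.Dict.get? nxt y with
             | some j => [(j - (0 + (ps.length : Int)) - 1, String.mk [y])]
             | none => []) ++ bScan (enumChars 0 ps).reverse (PySem.Dict.insert nxt y (0 + (ps.length : Int))) from rfl]
    have hlen : ((ps ++ [y]).length : Int) = (ps.length : Int) + 1 := by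
      simp
    have hrec : bScan (enumChars 0 ps).reverse (PySem.Dict.insert nxt y (0 + (ps.length : Int)))
        = (aScanIn ps (y :: suf)).reverse := by
      apply ih
      intro c
      by_cases hc : c = y
      · subst hc
        rw [PySem.Dict.get?_insert_self]
        rw [find_cons_single, if_pos rfl]
        norm_num
      · rw [PySem.Dict.get?_insert_of_ne _ _ hc]
        rw [hnxt c, find_cons_single, if_neg hc, hlen]
        split_ifs <;>
          first
          | rfl
          | omega
          | (congr 1; ring)
    rw [hrec, aScanIn_snoc, List.reverse_append, hnxt y, hlen]
    by_cases hf : PySem.Chars.find suf [y] ≥ 0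
    · rw [if_pos hf, if_pos hf]
      simp only [List.reverse_cons, List.reverse_nil, List.nil_append, List.singleton_append]
      congr 3
      ring
    · rw [if_neg hf, if_neg hf]
      simp

theorem intMax_eq_foldl : ∀ (l : List Int) (m : Int), intMax m l = l.foldl max m := by
  intro l
  induction l with
  | nil => intro m; rfl
  | cons x xs ih =>
    intro m
    rw [intMax, List.foldl_cons, ih]
    congr 1
    rcases lt_or_ge m x with h | h
    · rw [if_pos h, max_eq_right h.le]
    · rw [if_neg (by omega), max_eq_left h]

theorem pyMaxPair_fst : ∀ (l : List (Int × String)) (m : Int × String),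
    (pyMaxPair m l).1 = l.foldl (fun a p => max a p.1) m.1 := by
  intro l
  induction l with
  | nil => intro m; rfl
  | cons p rest ih =>
    intro m
    rw [pyMaxPair, List.foldl_cons, ih]
    congr 1
    by_cases h1 : m.1 < p.1
    · rw [if_pos (Or.inl h1), max_eq_right h1.le]
    · by_cases h2 : m.1 = p.1 ∧ m.2 < p.2
      · rw [if_pos (Or.inr h2)]
        omega
      · rw [if_neg (by tauto)]
        have : ¬ (m.1 = p.1 ∧ m.2 < p.2) := h2
        by_cases he : m.1 = p.1
        · omega
        · rw [max_eq_left (by omega)]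

theorem foldl_max_out : ∀ (l : List Int) (a b : Int),
    l.foldl max (max a b) = max (l.foldl max a) b := by
  intro l
  induction l with
  | nil => intro a b; rfl
  | cons x xs ih =>
    intro a b
    rw [List.foldl_cons, List.foldl_cons, max_right_comm, ih]

theorem foldl_max_reverse : ∀ (l : List Int) (a : Int),
    l.reverse.foldl max a = l.foldl max a := by
  intro l
  induction l with
  | nil => intro a; rfl
  | cons x xs ih =>
    intro a
    rw [List.reverse_cons, List.foldl_append, ih]
    simp only [List.foldl_cons, List.foldl_nil]
    rw [foldl_max_out]

theorem max_separator_eq (txt : String) : max_separator txt = max_separator_alt txt := by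
  have hB : bScan (enumChars 0 txt.toList).reverse PySem.Dict.empty
      = (aScan txt.toList).reverse := by
    rw [← aScanIn_nil txt.toList]
    apply bScan_eq
    intro c
    rw [find_nil_single]
    norm_num
  unfold max_separator max_separator_alt
  rw [hB]
  cases hL : aScan txt.toList with
  | nil => simp
  | cons p rest =>
    rcases hrev : (p :: rest).reverse with _ | ⟨g, t⟩
    · exact absurd (congrArg List.length hrev) (by simp)
    · simp only []
      have hgmem : g = p ∨ g ∈ rest := by
        have hm : g ∈ p :: rest :=
          List.mem_reverse.mp (by rw [hrev]; exact List.mem_cons_self)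
        exact List.mem_cons.mp hm
      -- both maxima agree
      have hbest : intMax g.1 (t.map (·.1)) = (pyMaxPair p rest).1 := by
        have h1 : intMax g.1 (t.map (·.1)) = ((g :: t).map (·.1)).foldl max g.1 := by
          rw [intMax_eq_foldl, List.map_cons, List.foldl_cons, max_self]
        have h2 : ((g :: t).map (·.1)) = ((p :: rest).map (·.1)).reverse := by
          rw [← hrev, List.map_reverse]
        have h3 : (pyMaxPair p rest).1 = (rest.map (·.1)).foldl max p.1 := by
          rw [pyMaxPair_fst, List.foldl_map]
        have hle : g.1 ≤ (rest.map (·.1)).foldl max p.1 := by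
          rcases hgmem with h | h
          · rw [h]; exact (PySem.List.le_foldl_max (rest.map (·.1)) p.1).1
          · exact (PySem.List.le_foldl_max (rest.map (·.1)) p.1).2 g.1
              (List.mem_map_of_mem h)
        rw [h1, h2, foldl_max_reverse, List.map_cons, List.foldl_cons, h3]
        rw [max_comm g.1 p.1, foldl_max_out]
        exact max_eq_left hle
      rw [hbest, ← hrev, List.filter_reverse, List.map_reverse]
      exact (PySem.List.sorted_eq_sorted_of_perm _ _ _ (fun a b h => h)
        (List.reverse_perm _)).symm

-- ===== VERDICT (by name: the statement is the Claim_ definition above) =====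
theorem max_separator_spec : Claim_equal_max_separator := by
  intro txt _
  unfold Spec_max_separator
  exact max_separator_eq txt
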